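-- pv_equiv track=rewrite | github.com/wlzshmily/commodity-option-data-manager | src/option_data_manager/api/app.py | _aggregate_tqsdk_connection_status
-- ===== SOURCE A (Python) =====
-- from typing import Any
--
-- def _aggregate_tqsdk_connection_status(rows: list[dict[str, Any]]) -> str:
--     statuses = {
--         str(row.get("tqsdk_connection_status") or "unknown") for row in rows
--     }
--     if "disconnected" in statuses:
--         return "disconnected"
--     if "reconnecting" in statuses:
--         return "reconnecting"
--     if "connected" in statuses:
--         return "connected"
--     return "unknown"
-- ===== SOURCE B (Python) =====
-- _RANK = {"disconnected": 0, "reconnecting": 1, "connected": 2}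
-- _NAMES = ("disconnected", "reconnecting", "connected", "unknown")
--
-- def _aggregate_tqsdk_connection_status(rows: list) -> str:
--     best = 3
--     for row in rows:
--         r = _RANK.get(str(row.get("tqsdk_connection_status") or "unknown"), 3)
--         if r == 0:
--             return "disconnected"
--         if r < best:
--             best = r
--     return _NAMES[best]
-- ===== Notes on version B (the rewrite author's own statement) =====
-- stated objective: alternative
-- what changed: Replaces the set comprehension plus three membership tests with a single early-exiting pass that folds each row's status into a scalar best-priority rank and translates the rank back at the end.
import Mathlib
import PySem

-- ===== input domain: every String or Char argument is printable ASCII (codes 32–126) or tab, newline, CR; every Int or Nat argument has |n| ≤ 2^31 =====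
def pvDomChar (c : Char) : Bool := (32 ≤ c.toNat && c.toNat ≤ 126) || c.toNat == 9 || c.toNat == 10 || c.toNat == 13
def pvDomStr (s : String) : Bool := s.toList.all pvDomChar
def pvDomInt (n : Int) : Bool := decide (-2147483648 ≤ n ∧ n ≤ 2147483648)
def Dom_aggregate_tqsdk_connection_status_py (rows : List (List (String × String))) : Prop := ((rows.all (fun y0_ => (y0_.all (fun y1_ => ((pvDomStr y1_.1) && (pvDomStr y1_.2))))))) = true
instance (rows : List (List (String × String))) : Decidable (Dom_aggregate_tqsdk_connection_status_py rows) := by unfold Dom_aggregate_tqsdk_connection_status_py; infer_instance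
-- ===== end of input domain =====

-- B replaces A's set-of-statuses plus three membership tests with a single early-exiting
-- pass folding each row into a scalar best-priority rank (alternative decomposition, same cost).

-- ===== PORT A =====
-- str(row.get("tqsdk_connection_status") or "unknown"): missing key or empty string -> "unknown"
def pvStatusA (row : List (String × String)) : String :=
  match (PySem.Dict.mk row).get? "tqsdk_connection_status" with
  | none => "unknown"
  | some s => if s = "" then "unknown" else s

def aggregate_tqsdk_connection_status_py (rows : List (List (String × String))) : String :=
  let statuses : PySem.Set String := PySem.Set.ofList (rows.map pvStatusA)
  if PySem.Set.contains statuses "disconnected" then "disconnected"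
  else if PySem.Set.contains statuses "reconnecting" then "reconnecting"
  else if PySem.Set.contains statuses "connected" then "connected"
  else "unknown"

-- ===== PORT B =====
def pvStatusB (row : List (String × String)) : String :=
  match (PySem.Dict.mk row).get? "tqsdk_connection_status" with
  | none => "unknown"
  | some s => if s = "" then "unknown" else s

-- _RANK.get(s, 3)
def pvRankB (s : String) : Nat :=
  (PySem.Dict.mk [("disconnected", 0), ("reconnecting", 1), ("connected", 2)]).getD s 3

def pvNamesB : List String := ["disconnected", "reconnecting", "connected", "unknown"]

def pvLoopB : List (List (String × String)) → Nat → String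
  | [], best => pvNamesB.getD best "unknown"
  | row :: rest, best =>
    let r := pvRankB (pvStatusB row)
    if r = 0 then "disconnected"
    else pvLoopB rest (if r < best then r else best)

def aggregate_tqsdk_connection_status_py_alt (rows : List (List (String × String))) : String :=
  pvLoopB rows 3

-- ===== PRECONDITION & SPEC =====
def Spec_aggregate_tqsdk_connection_status_py (rows : List (List (String × String))) (out : String) : Prop := out = aggregate_tqsdk_connection_status_py_alt rows
instance (rows : List (List (String × String))) (out : String) : Decidable (Spec_aggregate_tqsdk_connection_status_py rows out) := by unfold Spec_aggregate_tqsdk_connection_status_py; infer_instance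

-- ===== CLAIM (what is proved, stated in full; the proofs are below) =====
def Claim_equal_aggregate_tqsdk_connection_status_py : Prop := ∀ (rows : List (List (String × String))), Dom_aggregate_tqsdk_connection_status_py rows → Spec_aggregate_tqsdk_connection_status_py rows (aggregate_tqsdk_connection_status_py rows)

-- ===== LEMMAS AND PROOFS =====

theorem pvStatusBA : pvStatusB = pvStatusA := rfl

theorem pvRankB_eq (s : String) :
    pvRankB s = if s = "disconnected" then 0 else if s = "reconnecting" then 1
      else if s = "connected" then 2 else 3 := by
  by_cases h1 : s = "disconnected"
  · subst h1; decide
  · by_cases h2 : s = "reconnecting"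
    · subst h2; decide
    · by_cases h3 : s = "connected"
      · subst h3; decide
      · have n1 : ¬("disconnected" = s) := fun h => h1 h.symm
        have n2 : ¬("reconnecting" = s) := fun h => h2 h.symm
        have n3 : ¬("connected" = s) := fun h => h3 h.symm
        simp only [pvRankB, PySem.Dict.getD, PySem.Dict.get?_mk_cons, beq_iff_eq,
          if_neg n1, if_neg n2, if_neg n3, if_neg h1, if_neg h2, if_neg h3]
        simp [PySem.Dict.get?]

-- the fold B's loop computes
def pvMinFold (L : List String) (a : Nat) : Nat :=
  L.foldl (fun b s => min b (pvRankB s)) a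

theorem pvMinFold_le_iff (L : List String) (a k : Nat) :
    pvMinFold L a ≤ k ↔ a ≤ k ∨ ∃ s ∈ L, pvRankB s ≤ k := by
  induction L generalizing a with
  | nil => simp [pvMinFold]
  | cons x L ih =>
    simp only [pvMinFold, List.foldl_cons] at *
    rw [ih]
    constructor
    · rintro (h | h)
      · rcases min_le_iff.mp h with h' | h'
        · exact Or.inl h'
        · exact Or.inr ⟨x, by simp, h'⟩
      · obtain ⟨s, hs, hr⟩ := h
        exact Or.inr ⟨s, by simp [hs], hr⟩
    · rintro (h | ⟨s, hs, hr⟩)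
      · exact Or.inl (le_trans (min_le_left _ _) h)
      · rcases List.mem_cons.mp hs with rfl | hs'
        · exact Or.inl (le_trans (min_le_right _ _) hr)
        · exact Or.inr ⟨s, hs', hr⟩

theorem pvLoopB_eq (rows : List (List (String × String))) (best : Nat) :
    pvLoopB rows best = pvNamesB.getD (pvMinFold (rows.map pvStatusB) best) "unknown" := by
  induction rows generalizing best with
  | nil => simp [pvLoopB, pvMinFold]
  | cons row rest ih =>
    simp only [pvLoopB, List.map_cons, pvMinFold, List.foldl_cons]
    by_cases h0 : pvRankB (pvStatusB row) = 0
    · rw [if_pos h0, h0, min_zero]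
      have hz : List.foldl (fun b s => min b (pvRankB s)) 0 (rest.map pvStatusB) = 0 := by
        have := (pvMinFold_le_iff (rest.map pvStatusB) 0 0).mpr (Or.inl (le_refl 0))
        simpa [pvMinFold] using this
      rw [hz]
      rfl
    · rw [if_neg h0, ih]
      have hmin : (if pvRankB (pvStatusB row) < best then pvRankB (pvStatusB row) else best)
          = min best (pvRankB (pvStatusB row)) := by
        rw [min_def]; split_ifs <;> omega
      rw [hmin]
      rfl

theorem aggregate_tqsdk_connection_status_py_spec : Claim_equal_aggregate_tqsdk_connection_status_py := by
  intro rows _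
  unfold Spec_aggregate_tqsdk_connection_status_py
  simp only [aggregate_tqsdk_connection_status_py, aggregate_tqsdk_connection_status_py_alt]
  rw [pvLoopB_eq, pvStatusBA]
  generalize rows.map pvStatusA = L
  have hmem : ∀ y, PySem.Set.contains (PySem.Set.ofList L) y = true ↔ y ∈ L := by
    intro y; simp [PySem.Set.contains]
  have hle : ∀ k, pvMinFold L 3 ≤ k ↔ 3 ≤ k ∨ ∃ s ∈ L, pvRankB s ≤ k :=
    fun k => pvMinFold_le_iff L 3 k
  by_cases hd : "disconnected" ∈ L
  · have h0 : pvMinFold L 3 ≤ 0 := (hle 0).mpr (Or.inr ⟨_, hd, by rw [pvRankB_eq]; simp⟩)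
    rw [(hmem _).mpr hd, if_pos rfl]
    have hm : pvMinFold L 3 = 0 := by omega
    rw [hm]
    rfl
  · have hd' : PySem.Set.contains (PySem.Set.ofList L) "disconnected" = false := by
      rw [← Bool.not_eq_true, hmem]; exact hd
    have hne0 : pvMinFold L 3 ≠ 0 := by
      intro h
      rcases (hle 0).mp (le_of_eq h) with h' | ⟨s, hs, hr⟩
      · omega
      · rw [pvRankB_eq] at hr
        split_ifs at hr with a1
        · exact hd (a1 ▸ hs)
        all_goals omega
    rw [hd']
    simp only [Bool.false_eq_true, if_false]
    by_cases hr : "reconnecting" ∈ L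
    · have h1 : pvMinFold L 3 ≤ 1 := (hle 1).mpr (Or.inr ⟨_, hr, by rw [pvRankB_eq]; simp⟩)
      rw [(hmem _).mpr hr, if_pos rfl]
      have hm : pvMinFold L 3 = 1 := by omega
      rw [hm]
      rfl
    · have hr' : PySem.Set.contains (PySem.Set.ofList L) "reconnecting" = false := by
        rw [← Bool.not_eq_true, hmem]; exact hr
      have hne1 : pvMinFold L 3 ≠ 1 := by
        intro h
        rcases (hle 1).mp (le_of_eq h) with h' | ⟨s, hs, hrk⟩
        · omega
        · rw [pvRankB_eq] at hrk
          split_ifs at hrk with a1 a2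
          · exact hd (a1 ▸ hs)
          · exact hr (a2 ▸ hs)
          all_goals omega
      rw [hr']
      simp only [Bool.false_eq_true, if_false]
      by_cases hc : "connected" ∈ L
      · have h2 : pvMinFold L 3 ≤ 2 := (hle 2).mpr (Or.inr ⟨_, hc, by rw [pvRankB_eq]; simp⟩)
        rw [(hmem _).mpr hc, if_pos rfl]
        have hm : pvMinFold L 3 = 2 := by omega
        rw [hm]
        rfl
      · have hc' : PySem.Set.contains (PySem.Set.ofList L) "connected" = false := by
          rw [← Bool.not_eq_true, hmem]; exact hc
        have hne2 : pvMinFold L 3 ≠ 2 := by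
          intro h
          rcases (hle 2).mp (le_of_eq h) with h' | ⟨s, hs, hrk⟩
          · omega
          · rw [pvRankB_eq] at hrk
            split_ifs at hrk with a1 a2 a3
            · exact hd (a1 ▸ hs)
            · exact hr (a2 ▸ hs)
            · exact hc (a3 ▸ hs)
            · omega
        have h3 : pvMinFold L 3 ≤ 3 := (hle 3).mpr (Or.inl (le_refl 3))
        rw [hc']
        simp only [Bool.false_eq_true, if_false]
        have hm : pvMinFold L 3 = 3 := by omega
        rw [hm]
        rfl
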